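-- pv_equiv track=rewrite | github.com/TanShets/TanShets | exp1.py | cost3
-- ===== SOURCE A (Python) =====
-- def cost3(a, sumx):
--     if len(a) <= 0:
--         return sumx
--     elif len(a) == 2:
--         sumx += a[0] + a[1]
--         return sumx
--     b = []
--     i = 0
--     sumx = 0
--     while i < len(a) - 1:
--         sumx += a[i] + a[i + 1]
--         b.append(a[i])
--         i += 2
--     return cost3(b, sumx)
-- ===== SOURCE B (Python) =====
-- def cost3(a, sumx):
--     n = len(a)
--     if n == 0:
--         return sumx
--     if n == 2:
--         return sumx + a[0] + a[1]
--     # repeatedly halve the length until it reaches 0 or 2 (no lists are built)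
--     ncur, nprev, m = n, n, 0
--     while ncur != 0 and ncur != 2:
--         nprev = ncur
--         ncur = ncur // 2
--         m = m + 1
--     # survivors of level m-1 are a[i * stride]; the last pass summed its pairs
--     stride = 2 ** (m - 1)
--     s = 0
--     for i in range(2 * (nprev // 2)):
--         s = s + a[i * stride]
--     if ncur == 2:
--         s = s + a[0] + a[2 * stride]
--     return s
-- ===== Notes on version B (the rewrite author's own statement) =====
-- stated objective: faster
-- what changed: A rebuilds a list of even-index survivors at every level and recurses; B observes that the result depends only on the last halving level, so it halves just the LENGTH until it reaches 0 or 2 and then reads the at most 4 surviving elements (plus the two top survivors) directly by stride, building no intermediate lists.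
import Mathlib
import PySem

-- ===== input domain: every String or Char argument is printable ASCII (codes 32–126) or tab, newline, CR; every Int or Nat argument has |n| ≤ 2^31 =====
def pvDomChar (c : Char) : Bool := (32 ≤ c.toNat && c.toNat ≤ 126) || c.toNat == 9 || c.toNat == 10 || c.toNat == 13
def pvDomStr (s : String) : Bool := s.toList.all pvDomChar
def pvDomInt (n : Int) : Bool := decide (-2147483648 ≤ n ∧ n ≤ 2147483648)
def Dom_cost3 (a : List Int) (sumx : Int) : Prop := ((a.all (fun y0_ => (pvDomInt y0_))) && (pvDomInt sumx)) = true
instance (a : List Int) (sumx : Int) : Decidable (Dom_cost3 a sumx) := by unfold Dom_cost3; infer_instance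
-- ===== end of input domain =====

-- B replaces A's list-rebuilding recursion by halving only the LENGTH until it reaches 0 or 2,
-- then reading the ≤ 4 surviving elements of the last level directly by stride — O(log n) work.

-- ===== PORT A =====
-- A's while loop (i = 0, 2, 4, … while i < len(a)-1): structural recursion on the suffix that
-- still has ≥ 2 elements, carrying the same state (b, sumx).
def cost3Loop : List Int → List Int → Int → List Int × Int
  | [], b, s => (b, s)
  | [_], b, s => (b, s)
  | x :: y :: rest, b, s => cost3Loop rest (b ++ [x]) (s + (x + y))

-- needed by cost3's termination proof (cited in decreasing_by)
theorem cost3Loop_len (l b : List Int) (s : Int) :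
    (cost3Loop l b s).1.length = b.length + l.length / 2 := by
  fun_induction cost3Loop l b s <;> simp_all
  omega

def cost3 (a : List Int) (sumx : Int) : Int :=
  if a.length ≤ 0 then sumx
  else if a.length = 2 then sumx + (a.getD 0 0 + a.getD 1 0)
  else
    let r := cost3Loop a [] 0
    cost3 r.1 r.2
termination_by a.length
decreasing_by simp [cost3Loop_len]; omega

-- ===== PORT B =====
-- B's `while ncur != 0 and ncur != 2` loop on the three integers (ncur, nprev, m)
def halveLoop (ncur nprev m : Nat) : Nat × Nat × Nat :=
  if h : ncur ≠ 0 ∧ ncur ≠ 2 then halveLoop (ncur / 2) ncur (m + 1)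
  else (ncur, nprev, m)
termination_by ncur
decreasing_by exact Nat.div_lt_self (by omega) (by omega)

-- B's `for i in range(2 * (nprev // 2)): s += a[i * stride]`
def sumStrideB (a : List Int) (k stride : Nat) : Int :=
  (List.range k).foldl (fun s i => s + a.getD (i * stride) 0) 0

def cost3_alt (a : List Int) (sumx : Int) : Int :=
  let n := a.length
  if n = 0 then sumx
  else if n = 2 then sumx + (a.getD 0 0 + a.getD 1 0)
  else
    let r := halveLoop n n 0
    let stride := 2 ^ (r.2.2 - 1)
    let s := sumStrideB a (2 * (r.2.1 / 2)) stride
    if r.1 = 2 then s + (a.getD 0 0 + a.getD (2 * stride) 0) else s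

-- ===== PRECONDITION & SPEC =====
def Spec_cost3 (a : List Int) (sumx : Int) (out : Int) : Prop := out = cost3_alt a sumx
instance (a : List Int) (sumx : Int) (out : Int) : Decidable (Spec_cost3 a sumx out) := by unfold Spec_cost3; infer_instance

-- ===== CLAIM (what is proved, stated in full; the proofs are below) =====
def Claim_equal_cost3 : Prop := ∀ (a : List Int) (sumx : Int), Dom_cost3 a sumx → Spec_cost3 a sumx (cost3 a sumx)

-- ===== LEMMAS AND PROOFS =====

-- the even-index survivors and the pair sum of one level of A
def evens : List Int → List Int
  | [] => []
  | [_] => []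
  | x :: _ :: rest => x :: evens rest

def pairSum : List Int → Int
  | [] => 0
  | [_] => 0
  | x :: y :: rest => x + y + pairSum rest

theorem loop_char (l b : List Int) (s : Int) :
    cost3Loop l b s = (b ++ evens l, s + pairSum l) := by
  fun_induction cost3Loop l b s <;> simp_all [evens, pairSum] <;> ring

theorem evens_len (l : List Int) : (evens l).length = l.length / 2 := by
  fun_induction evens l <;> simp_all
  omega

theorem evens_getD (l : List Int) (j : Nat) (h : 2 * j + 1 < l.length) :
    (evens l).getD j 0 = l.getD (2 * j) 0 := by
  fun_induction evens l generalizing j with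
  | case1 => simp at h
  | case2 _ => simp at h
  | case3 x y rest ih =>
    cases j with
    | zero => simp
    | succ j =>
      have h' : 2 * j + 1 < rest.length := by simp at h; omega
      have e2 : 2 * (j + 1) = (2 * j + 1) + 1 := by omega
      simp only [e2, List.getD_cons_succ]
      exact ih j h'

theorem sumStrideB_eq (a : List Int) (k st : Nat) :
    sumStrideB a k st = ∑ i ∈ Finset.range k, a.getD (i * st) 0 := by
  induction k with
  | zero => simp [sumStrideB]
  | succ k ih =>
    simp only [sumStrideB, List.range_succ, List.foldl_append, List.foldl_cons, List.foldl_nil] at *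
    rw [ih, Finset.sum_range_succ]

theorem pairSum_eq (l : List Int) :
    pairSum l = ∑ i ∈ Finset.range (2 * (l.length / 2)), l.getD i 0 := by
  fun_induction pairSum l with
  | case1 => simp
  | case2 _ => simp
  | case3 x y rest ih =>
    have e : 2 * ((x :: y :: rest).length / 2) = 2 * (rest.length / 2) + 1 + 1 := by
      simp; omega
    rw [e, Finset.sum_range_succ', Finset.sum_range_succ', ih]
    simp only [List.getD_cons_succ, List.getD_cons_zero]
    ring

theorem sum_evens (a : List Int) (k st : Nat) (h : ∀ i < k, 2 * (i * st) + 1 < a.length) :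
    ∑ i ∈ Finset.range k, (evens a).getD (i * st) 0
      = ∑ i ∈ Finset.range k, a.getD (i * (2 * st)) 0 := by
  refine Finset.sum_congr rfl (fun i hi => ?_)
  rw [evens_getD a (i * st) (h i (Finset.mem_range.mp hi))]
  congr 1; ring

theorem halveLoop_stop (c x m : Nat) (h : c = 0 ∨ c = 2) : halveLoop c x m = (c, x, m) := by
  rw [halveLoop, dif_neg (by omega)]

theorem halveLoop_step (c x m : Nat) (h0 : c ≠ 0) (h2 : c ≠ 2) :
    halveLoop c x m = halveLoop (c / 2) c (m + 1) := by
  rw [halveLoop, dif_pos ⟨h0, h2⟩]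

theorem halve_shift (c : Nat) (h0 : c ≠ 0) (h2 : c ≠ 2) : ∀ x y m,
    halveLoop c x m = ((halveLoop c y 0).1, (halveLoop c y 0).2.1, m + (halveLoop c y 0).2.2) := by
  induction c using Nat.strong_induction_on with
  | _ c IH =>
    intro x y m
    rw [halveLoop_step c x m h0 h2, halveLoop_step c y 0 h0 h2]
    by_cases hc : c / 2 = 0 ∨ c / 2 = 2
    · rw [halveLoop_stop _ _ _ hc, halveLoop_stop _ _ _ hc]
    · rw [not_or] at hc
      obtain ⟨g0, g2⟩ := hc
      have hlt : c / 2 < c := Nat.div_lt_self (by omega) (by omega)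
      rw [IH (c / 2) hlt g0 g2 c (c / 2) (m + 1), IH (c / 2) hlt g0 g2 c (c / 2) 1]
      rw [Prod.mk.injEq, Prod.mk.injEq]
      refine ⟨rfl, rfl, ?_⟩
      show m + 1 + (halveLoop (c / 2) (c / 2) 0).2.2 = m + (1 + (halveLoop (c / 2) (c / 2) 0).2.2)
      omega

theorem halve_spec (c : Nat) (h0 : c ≠ 0) (h2 : c ≠ 2) : ∀ x,
    1 ≤ (halveLoop c x 0).2.2 ∧
    (halveLoop c x 0).2.1 = c / 2 ^ ((halveLoop c x 0).2.2 - 1) ∧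
    (halveLoop c x 0).1 = c / 2 ^ (halveLoop c x 0).2.2 ∧
    ((halveLoop c x 0).1 = 0 ∨ (halveLoop c x 0).1 = 2) := by
  induction c using Nat.strong_induction_on with
  | _ c IH =>
    intro x
    rw [halveLoop_step c x 0 h0 h2]
    by_cases hc : c / 2 = 0 ∨ c / 2 = 2
    · rw [halveLoop_stop _ _ _ hc]
      simpa using hc
    · rw [not_or] at hc
      obtain ⟨g0, g2⟩ := hc
      have hlt : c / 2 < c := Nat.div_lt_self (by omega) (by omega)
      rw [halve_shift (c / 2) g0 g2 c (c / 2) 1]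
      obtain ⟨h1, hp, hcv, hmem⟩ := IH (c / 2) hlt g0 g2 (c / 2)
      have hdd : ∀ k, c / 2 / 2 ^ k = c / 2 ^ (k + 1) := by
        intro k
        rw [Nat.div_div_eq_div_mul, pow_succ, mul_comm (2 ^ k) 2]
      refine ⟨by change 1 ≤ 1 + (halveLoop (c / 2) (c / 2) 0).2.2; omega, ?_, ?_, hmem⟩
      · change (halveLoop (c / 2) (c / 2) 0).2.1 = c / 2 ^ (1 + (halveLoop (c / 2) (c / 2) 0).2.2 - 1)
        rw [hp, hdd]
        congr 2
        omega
      · change (halveLoop (c / 2) (c / 2) 0).1 = c / 2 ^ (1 + (halveLoop (c / 2) (c / 2) 0).2.2)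
        rw [hcv, hdd]
        congr 2
        omega

-- B's else-branch is invariant under replacing a by its even survivors (one A-step)
theorem alt_step (a : List Int) (s1 s2 : Int) (h0 : a.length ≠ 0) (h2 : a.length ≠ 2)
    (g0 : a.length / 2 ≠ 0) (g2 : a.length / 2 ≠ 2) :
    cost3_alt (evens a) s1 = cost3_alt a s2 := by
  have hn2 : (evens a).length = a.length / 2 := evens_len a
  obtain ⟨h1, hp, hcv, hmem⟩ := halve_spec (a.length / 2) g0 g2 (a.length / 2)
  have hstep : halveLoop a.length a.length 0 =
      ((halveLoop (a.length / 2) (a.length / 2) 0).1,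
       (halveLoop (a.length / 2) (a.length / 2) 0).2.1,
       1 + (halveLoop (a.length / 2) (a.length / 2) 0).2.2) := by
    rw [halveLoop_step a.length a.length 0 h0 h2,
        halve_shift (a.length / 2) g0 g2 a.length (a.length / 2) 1]
  set R := halveLoop (a.length / 2) (a.length / 2) 0 with hR
  rw [cost3_alt, cost3_alt]
  simp only [hn2, g0, g2, h0, h2, if_false, hstep]
  have hm1 : 1 + R.2.2 - 1 = R.2.2 := by omega
  have hpow : 2 * 2 ^ (R.2.2 - 1) = 2 ^ R.2.2 := by
    conv_rhs => rw [show R.2.2 = (R.2.2 - 1) + 1 by omega]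
    rw [pow_succ]
    ring
  have hbound : ∀ i < 2 * (R.2.1 / 2), 2 * (i * 2 ^ (R.2.2 - 1)) + 1 < a.length := by
    intro i hi
    set st := 2 ^ (R.2.2 - 1) with hst
    have hst1 : 1 ≤ st := Nat.one_le_two_pow
    have hmul : (i + 1) * st ≤ R.2.1 * st := Nat.mul_le_mul_right st (by omega)
    have hps : R.2.1 * st ≤ a.length / 2 := by
      rw [hp, hst]
      exact Nat.div_mul_le_self _ _
    have hsm : (i + 1) * st = i * st + st := by rw [Nat.succ_mul]
    omega
  have hsum : sumStrideB (evens a) (2 * (R.2.1 / 2)) (2 ^ (R.2.2 - 1))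
      = sumStrideB a (2 * (R.2.1 / 2)) (2 ^ (1 + R.2.2 - 1)) := by
    rw [sumStrideB_eq, sumStrideB_eq, sum_evens a _ _ hbound, hm1]
    refine Finset.sum_congr rfl (fun i _ => ?_)
    rw [hpow]
  rw [hsum, hm1, ← hR]
  rcases hmem with hc0 | hc2
  · simp [hc0]
  · have hle : 2 * 2 ^ R.2.2 ≤ a.length / 2 := by
      rw [hc2] at hcv
      exact (Nat.le_div_iff_mul_le (by positivity)).mp (by omega)
    have hQ : 1 ≤ 2 ^ R.2.2 := Nat.one_le_two_pow
    have e1 : 2 * 2 ^ R.2.2 = 2 * (2 * 2 ^ (R.2.2 - 1)) := by rw [hpow]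
    have hgd : (evens a).getD (2 * 2 ^ (R.2.2 - 1)) 0 = a.getD (2 * 2 ^ R.2.2) 0 := by
      rw [e1, evens_getD a _ (by omega)]
    have hg0 : (evens a).getD 0 0 = a.getD 0 0 := by
      have h01 := evens_getD a 0 (by omega)
      simpa using h01
    rw [if_pos hc2, if_pos hc2, hgd, hg0]

-- main equivalence, by strong induction on the length
theorem cost3_eq : ∀ n (a : List Int) (sumx : Int), a.length = n → cost3 a sumx = cost3_alt a sumx := by
  intro n
  induction n using Nat.strong_induction_on with
  | _ n IH =>
    intro a sumx hn
    by_cases h0 : a.length = 0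
    · obtain rfl : a = [] := List.eq_nil_of_length_eq_zero h0
      rw [cost3, cost3_alt]
      simp
    · by_cases h2 : a.length = 2
      · rw [cost3, cost3_alt]
        simp [h2]
      · have hA : cost3 a sumx = cost3 (evens a) (pairSum a) := by
          rw [cost3]
          simp [h0, h2, loop_char]
        have hev : (evens a).length = a.length / 2 := evens_len a
        by_cases g0 : a.length / 2 = 0
        · have h1 : a.length = 1 := by omega
          obtain ⟨x, rfl⟩ := List.length_eq_one_iff.mp h1
          rw [hA]
          have he : evens [x] = [] := rfl
          have hps : pairSum [x] = (0 : Int) := rfl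
          rw [he, hps, cost3, cost3_alt]
          norm_num
          all_goals rw [halveLoop_step 1 1 0 (by omega) (by omega), halveLoop_stop 0 1 1 (by omega)]
          all_goals simp [sumStrideB]
        · by_cases g2 : a.length / 2 = 2
          · have h4 : 4 ≤ a.length := by omega
            rw [hA, cost3]
            simp only [hev, g2, Nat.le_zero, if_false, OfNat.ofNat_ne_zero, if_pos]
            rw [evens_getD a 0 (by omega), evens_getD a 1 (by omega)]
            rw [cost3_alt]
            simp only [h0, h2, if_false]
            rw [halveLoop_step a.length a.length 0 h0 h2, g2, halveLoop_stop 2 a.length 1 (by omega)]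
            rw [sumStrideB_eq, pairSum_eq]
            simp
          · have hlt : (evens a).length < n := by rw [hev]; omega
            rw [hA, IH (evens a).length hlt (evens a) (pairSum a) rfl]
            exact alt_step a (pairSum a) sumx h0 h2 g0 g2

-- ===== VERDICT (by name: the statement is the Claim_ definition above) =====
theorem cost3_spec : Claim_equal_cost3 := by
  intro a sumx _
  show cost3 a sumx = cost3_alt a sumx
  exact cost3_eq a.length a sumx rfl
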